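-- pv_equiv track=rewrite | github.com/BadRussianSPb/algorithms | Pavlov_Egor_lesson_3/PE-les_3_task_2.py | even_idx
-- ===== SOURCE A (Python) =====
-- def even_idx(given, result=None, count=0):
--     if result is None:
--         result = []
--     while count < len(given):
--         if given[count] % 2 == 0:
--             result.append(count)
--         return even_idx(given, result, count + 1)
--     return result
-- ===== SOURCE B (Python) =====
-- def even_idx(given, result=None, count=0):
--     if result is None:
--         result = []
--     for i in range(count, len(given)):
--         if given[i] % 2 == 0:
--             result.append(i)
--     return result
-- ===== Notes on version B (the rewrite author's own statement) =====
-- stated objective: simpler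
-- what changed: Replaced the one-recursive-call-per-index tail recursion (a while loop that always returns on its first iteration) with a single flat for-loop from count to len(given), keeping the caller-supplied accumulator and start index.
import Mathlib
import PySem

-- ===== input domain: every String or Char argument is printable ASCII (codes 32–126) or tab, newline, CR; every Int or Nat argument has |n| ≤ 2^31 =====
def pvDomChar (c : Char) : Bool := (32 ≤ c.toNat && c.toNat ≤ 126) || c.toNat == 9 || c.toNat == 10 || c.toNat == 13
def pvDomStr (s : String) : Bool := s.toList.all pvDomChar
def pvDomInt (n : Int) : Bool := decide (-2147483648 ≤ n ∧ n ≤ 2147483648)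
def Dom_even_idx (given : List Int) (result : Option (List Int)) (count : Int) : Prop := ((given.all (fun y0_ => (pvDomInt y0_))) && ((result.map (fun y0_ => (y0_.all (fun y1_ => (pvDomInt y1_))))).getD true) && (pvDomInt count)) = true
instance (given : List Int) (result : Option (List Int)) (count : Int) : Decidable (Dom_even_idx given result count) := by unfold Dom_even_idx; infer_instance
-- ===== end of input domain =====

-- B replaces A's tail recursion (one recursive call per index) with a single flat loop; objective: simpler.
-- Pre_ excludes count < -len(given), where both programs raise IndexError on the first element access.


-- ===== PORT A =====
-- A's while-loop body always returns, so A is a tail recursion stepping count by 1.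
def even_idx_go (given : List Int) (res : List Int) (count : Int) : List Int :=
  if _h : count < (given.length : Int) then
    even_idx_go given
      (if PySem.Int.mod ((PySem.List.pyGet? given count).getD 0) 2 == 0 then res ++ [count] else res)
      (count + 1)
  else res
termination_by ((given.length : Int) - count).toNat
decreasing_by omega

def even_idx (given : List Int) (result : Option (List Int)) (count : Int) : List Int :=
  even_idx_go given (result.getD []) count

-- ===== PORT B =====
def even_idx_alt (given : List Int) (result : Option (List Int)) (count : Int) : List Int :=
  (PySem.List.pyRange count (given.length : Int) 1).foldl
    (fun acc i => if PySem.Int.mod ((PySem.List.pyGet? given i).getD 0) 2 == 0 then acc ++ [i] else acc)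
    (result.getD [])

-- ===== PRECONDITION & SPEC =====
-- Pre_ excludes count < -len(given): there given[count] raises IndexError in both A and B.
def Pre_even_idx (given : List Int) (result : Option (List Int)) (count : Int) : Prop :=
  -(given.length : Int) ≤ count
instance (given : List Int) (result : Option (List Int)) (count : Int) : Decidable (Pre_even_idx given result count) := by unfold Pre_even_idx; infer_instance
def pvWitness_even_idx : List Int × Option (List Int) × Int := ([1, 2, 3, 4], none, 0)

def Spec_even_idx (given : List Int) (result : Option (List Int)) (count : Int) (out : List Int) : Prop := out = even_idx_alt given result count
instance (given : List Int) (result : Option (List Int)) (count : Int) (out : List Int) : Decidable (Spec_even_idx given result count out) := by unfold Spec_even_idx; infer_instance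

-- ===== CLAIM (what is proved, stated in full; the proofs are below) =====
def Claim_equal_even_idx : Prop := ∀ (given : List Int) (result : Option (List Int)) (count : Int), Dom_even_idx given result count → Pre_even_idx given result count → Spec_even_idx given result count (even_idx given result count)

-- ===== LEMMAS AND PROOFS =====
lemma even_idx_go_eq_foldl (given : List Int) :
    ∀ (n : Nat) (res : List Int) (count : Int), ((given.length : Int) - count).toNat = n →
    even_idx_go given res count =
      (PySem.List.pyRange count (given.length : Int) 1).foldl
        (fun acc i => if PySem.Int.mod ((PySem.List.pyGet? given i).getD 0) 2 == 0 then acc ++ [i] else acc)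
        res := by
  intro n
  induction n with
  | zero =>
    intro res count hn
    have hge : (given.length : Int) ≤ count := by omega
    rw [even_idx_go, PySem.List.pyRange_one_eq_nil hge]
    simp [not_lt.mpr hge]
  | succ k ih =>
    intro res count hn
    have hlt : count < (given.length : Int) := by omega
    rw [even_idx_go, PySem.List.pyRange_one_cons hlt]
    simp only [hlt, dif_pos, List.foldl_cons]
    exact ih _ (count + 1) (by omega)

-- ===== VERDICT (by name: the statement is the Claim_ definition above) =====
theorem even_idx_spec : Claim_equal_even_idx := by
  intro given result count _hdom _hpre
  unfold Spec_even_idx even_idx even_idx_alt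
  exact even_idx_go_eq_foldl given _ _ _ rfl
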